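-- pv_equiv track=rewrite | github.com/Imperial-iGEM/DJANGO-Assembly-Methods | biobricks_assembly/biobricks10/bbinput.py | next_well_reagent
-- ===== SOURCE A (Python) =====
-- from typing import List, Dict, Tuple
--
-- def next_well_reagent(
--     wells_used: List[str]
-- ) -> str:
--     '''
--         Finds the next available well from a list of used wells
--         for a 24 well plate/tube rack
--         Args:
--             List of wells used in 24 well plate/tube rack
--         Returns:
--             Next unused well in 24 well plate/tube rack
--     '''
--     letter = ['A', 'B', 'C', 'D']
--     well_avail = None
--     for i in range(24):
--         rowindex = i // 6
--         row = letter[rowindex]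
--         col = (i % 6) + 1
--         well = row + str(col)
--         if well in wells_used:
--             continue
--         else:
--             well_avail = well
--             break
--     if not well_avail:
--         raise ValueError('No empty wells')
--     return well_avail
-- ===== SOURCE B (Python) =====
-- def next_well_reagent(wells_used):
--     '''Simpler: build all 24 well names, take the set difference with the used
--     wells, and return the minimum remaining name (lexicographic min coincides
--     with the generation order since columns are single digits).'''
--     all_wells = [row + str(col) for row in 'ABCD' for col in range(1, 7)]
--     available = set(all_wells) - set(wells_used)
--     if not available:
--         raise ValueError('No empty wells')
--     return min(available)
-- ===== Notes on version B (the rewrite author's own statement) =====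
-- stated objective: simpler
-- what changed: Replaces the index loop (i//6, i%6, break on first miss) with a declarative set difference of all 24 well names against the used wells followed by min(), which equals the first-miss scan because the well names are generated in increasing lexicographic order.
import Mathlib
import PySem

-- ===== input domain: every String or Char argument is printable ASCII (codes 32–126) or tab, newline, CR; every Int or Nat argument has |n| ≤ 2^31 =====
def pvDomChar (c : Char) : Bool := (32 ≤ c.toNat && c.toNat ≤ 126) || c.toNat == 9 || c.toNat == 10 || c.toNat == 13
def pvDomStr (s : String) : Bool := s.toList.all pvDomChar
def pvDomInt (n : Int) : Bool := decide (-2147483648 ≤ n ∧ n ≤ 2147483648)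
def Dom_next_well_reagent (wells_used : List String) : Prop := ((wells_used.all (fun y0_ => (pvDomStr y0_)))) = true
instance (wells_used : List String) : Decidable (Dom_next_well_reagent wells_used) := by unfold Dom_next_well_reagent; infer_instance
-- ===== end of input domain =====

-- B replaces A's index loop with a set difference of all 24 well names against the
-- used wells followed by min(); objective: simpler, same cost.

-- ===== PORT A =====
-- the loop 'for i in range(24): … break' with the mutable well_avail, as structural
-- recursion over the range list; 'letter[rowindex]' is always in range (i < 24 so
-- rowindex < 4), so the pyGet? never misses and .getD "" is never taken
def nwrLoopA (wells_used : List String) : List Int → Option String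
  | [] => none
  | i :: rest =>
    let rowindex := PySem.Int.floordiv i 6
    let row := (PySem.List.pyGet? ["A", "B", "C", "D"] rowindex).getD ""
    let col := PySem.Int.mod i 6 + 1
    let well := row ++ PySem.Int.toStr col
    if wells_used.contains well then nwrLoopA wells_used rest
    else some well

def next_well_reagent (wells_used : List String) : String :=
  match nwrLoopA wells_used (PySem.List.pyRange 0 24 1) with
  | some w => w
  | none => ""   -- Python: raise ValueError('No empty wells'); excluded by Pre_

-- ===== PORT B =====
def next_well_reagent_alt (wells_used : List String) : String :=
  let all_wells : List String :=
    ("ABCD".toList).flatMap (fun row =>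
      (PySem.List.pyRange 1 7 1).map (fun col => String.ofList [row] ++ PySem.Int.toStr col))
  let available : PySem.Set String :=
    PySem.Set.diff (PySem.Set.ofList all_wells) (PySem.Set.ofList wells_used)
  match PySem.List.min? available (fun x => x) with
  | some m => m
  | none => ""   -- Python: raise ValueError('No empty wells'); excluded by Pre_

-- ===== PRECONDITION & SPEC =====
-- Pre_ excludes exactly the inputs containing all 24 well names, on which both
-- Pythons raise ValueError('No empty wells')
def Pre_next_well_reagent (wells_used : List String) : Prop :=
  ¬ ∀ w ∈ ["A1", "A2", "A3", "A4", "A5", "A6", "B1", "B2", "B3", "B4", "B5", "B6",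
           "C1", "C2", "C3", "C4", "C5", "C6", "D1", "D2", "D3", "D4", "D5", "D6"],
      w ∈ wells_used
instance (wells_used : List String) : Decidable (Pre_next_well_reagent wells_used) := by
  unfold Pre_next_well_reagent; infer_instance

def pvWitness_next_well_reagent : List String := (["B1", "A3"])

def Spec_next_well_reagent (wells_used : List String) (out : String) : Prop := out = next_well_reagent_alt wells_used
instance (wells_used : List String) (out : String) : Decidable (Spec_next_well_reagent wells_used out) := by unfold Spec_next_well_reagent; infer_instance

-- ===== CLAIM (what is proved, stated in full; the proofs are below) =====
def Claim_equal_next_well_reagent : Prop := ∀ (wells_used : List String), Dom_next_well_reagent wells_used → Pre_next_well_reagent wells_used → Spec_next_well_reagent wells_used (next_well_reagent wells_used)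

-- ===== LEMMAS AND PROOFS =====

-- the 24 well names in generation order
def pvW24 : List String :=
  ["A1", "A2", "A3", "A4", "A5", "A6", "B1", "B2", "B3", "B4", "B5", "B6",
   "C1", "C2", "C3", "C4", "C5", "C6", "D1", "D2", "D3", "D4", "D5", "D6"]

theorem pvW24_sorted : List.Pairwise (· ≤ ·) pvW24 := by
  simp only [pvW24, List.pairwise_cons, List.mem_cons, List.not_mem_nil]
  norm_num [String.le_iff_toList_le]
  and_intros <;> decide

theorem foldl_min_eq_self {α : Type} [LinearOrder α] (t : List α) (x : α)
    (h : ∀ y ∈ t, x ≤ y) : t.foldl min x = x := by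
  induction t with
  | nil => rfl
  | cons y t ih =>
    simp only [List.foldl_cons, min_eq_left (h y (by simp))]
    exact ih (fun z hz => h z (by simp [hz]))

-- min of a filtered ≤-sorted list is its first element, i.e. find? on the list
theorem min?_filter_eq_find? (l : List String) (p : String → Bool)
    (hl : l.Pairwise (· ≤ ·)) :
    PySem.List.min? (l.filter p) (fun x => x) = l.find? p := by
  induction l with
  | nil => rfl
  | cons x t ih =>
    rcases List.pairwise_cons.mp hl with ⟨hx, ht⟩
    cases h : p x with
    | false => simpa [List.filter_cons, List.find?_cons, h] using ih ht
    | true =>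
      simp only [List.filter_cons, List.find?_cons, h, if_true]
      rw [PySem.List.min?_id_cons, foldl_min_eq_self]
      intro y hy
      exact hx y (List.mem_of_mem_filter hy)

-- A's loop is find? over the mapped well names
theorem nwrLoopA_eq_find? (u : List String) (is : List Int) :
    nwrLoopA u is
      = ((is.map (fun i =>
            (PySem.List.pyGet? ["A", "B", "C", "D"] (PySem.Int.floordiv i 6)).getD ""
              ++ PySem.Int.toStr (PySem.Int.mod i 6 + 1)))).find?
          (fun w => !u.contains w) := by
  induction is with
  | nil => rfl
  | cons i rest ih =>
    simp only [nwrLoopA, List.map_cons, List.find?_cons]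
    cases h : u.contains
        ((PySem.List.pyGet? ["A", "B", "C", "D"] (PySem.Int.floordiv i 6)).getD ""
          ++ PySem.Int.toStr (PySem.Int.mod i 6 + 1)) with
    | true => simp [ih]
    | false => simp

theorem loopA_eq_find? (u : List String) :
    nwrLoopA u (PySem.List.pyRange 0 24 1) = pvW24.find? (fun w => !u.contains w) := by
  rw [nwrLoopA_eq_find?]
  congr 1

theorem alt_eq_find? (u : List String) :
    next_well_reagent_alt u
      = match pvW24.find? (fun w => !u.contains w) with
        | some w => w | none => "" := by
  unfold next_well_reagent_alt
  dsimp only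
  rw [show ("ABCD".toList).flatMap (fun row =>
        (PySem.List.pyRange 1 7 1).map (fun col => String.ofList [row] ++ PySem.Int.toStr col))
      = pvW24 from by decide]
  rw [PySem.Set.ofList_eq_self_of_nodup pvW24 (by decide)]
  have hdiff : PySem.Set.diff pvW24 (PySem.Set.ofList u)
      = pvW24.filter (fun w => !u.contains w) := by
    show pvW24.filter _ = _
    congr 1
    funext w
    by_cases hw : w ∈ u <;>
      simp [hw, PySem.Set.contains, PySem.Set.mem_ofList]
  rw [hdiff, min?_filter_eq_find? pvW24 _ pvW24_sorted]

-- ===== VERDICT (by name: the statement is the Claim_ definition above) =====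
theorem next_well_reagent_spec : Claim_equal_next_well_reagent := by
  intro u _ _
  show next_well_reagent u = next_well_reagent_alt u
  rw [alt_eq_find?]
  unfold next_well_reagent
  rw [loopA_eq_find?]
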